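-- pv_equiv track=rewrite | github.com/tslowndes/mathgen | polls/views.py | tidy_algebra
-- ===== SOURCE A (Python) =====
-- def tidy_algebra(q):
--     i = 1
--     while i < len(q):
--         if q[i].isalpha():
--             if i > 1:
--                 if q[i-1] == "1" and q[i-2].isnumeric()==False:
--                     q = q[:i-1] + q[i:]
--                 elif q[i-1] == "1" and q[i-2] == "-":
--                     q = q[:i-1] + q[i:]
--                 else:
--                     i += 1
--             else:
--                 if q[i-1] == "1":
--                     #q = q[:i-1] + q[i:]
--                     q = q[i:]
--                 i += 1
--         else:
--             i += 1
--
--     i = 1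
--
--     while i < len(q):
--         if q[i] == "+":
--             if q[i+2] == "-":
--                 q = q[:i] + q[i+2] + " " + q[i+3:]
--         i += 1
--
--     i = 1
--
--     while i < len(q):
--         if q[i] == "^":
--             if q[i+1] == '1':
--                 q = q[:i] + q[i+2:]
--             else:
--                 i += 1
--         else:
--             i += 1
--
--     return q
-- ===== SOURCE B (Python) =====
-- def tidy_algebra(q):
--     # pass 1: drop coefficient "1" right before a letter (unless preceded by a digit)
--     out = []
--     for c in q:
--         if c.isalpha() and out and out[-1] == "1" and (len(out) == 1 or not out[-2].isnumeric()):
--             out.pop()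
--         out.append(c)
--     s = out
--     # pass 2: "+x-..." (position >= 1) becomes "- ..."
--     n = len(s)
--     r = s[:1]
--     j = 1
--     while j < n:
--         if s[j] == "+" and j + 2 < n and s[j + 2] == "-":
--             r.append("-")
--             r.append(" ")
--             j += 3
--         else:
--             r.append(s[j])
--             j += 1
--     # pass 3: drop "^1" (position >= 1)
--     n = len(r)
--     t = r[:1]
--     j = 1
--     while j < n:
--         if r[j] == "^" and j + 1 < n and r[j + 1] == "1":
--             j += 2
--         else:
--             t.append(r[j])
--             j += 1
--     return "".join(t)
-- ===== Notes on version B (the rewrite author's own statement) =====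
-- stated objective: faster
-- what changed: A repeatedly rescans and rebuilds the string with O(n) slice-and-concatenate steps inside three index-driven while loops; B does three single left-to-right passes that build the result in a list buffer, so each pass is linear.
import Mathlib
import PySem

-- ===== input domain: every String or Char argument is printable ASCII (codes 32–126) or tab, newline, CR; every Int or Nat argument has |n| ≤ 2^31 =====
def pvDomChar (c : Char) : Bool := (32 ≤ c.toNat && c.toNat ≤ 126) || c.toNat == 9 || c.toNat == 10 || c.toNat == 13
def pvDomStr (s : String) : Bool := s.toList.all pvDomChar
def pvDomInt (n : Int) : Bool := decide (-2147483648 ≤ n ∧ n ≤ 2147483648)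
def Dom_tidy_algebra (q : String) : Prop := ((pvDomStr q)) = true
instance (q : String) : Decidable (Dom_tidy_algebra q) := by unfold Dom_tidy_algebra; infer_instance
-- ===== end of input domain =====

-- B replaces A's three rescanning while loops (each deletion/replacement rebuilds the string by
-- slicing) with three single left-to-right passes over a list buffer.
-- Python's isnumeric/isdigit/isalpha coincide with PySem.Chars.isdigit/isalpha on the ASCII domain Dom.

-- ===== PORT A =====
-- first while loop: delete a "1" right before a letter (unless preceded by a digit)
def loop1A (l : List Char) (i : Nat) : List Char :=
  if h : i < l.length then
    if PySem.Chars.isalpha (l.getD i ' ') = true then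
      if 1 < i then
        if l.getD (i-1) ' ' = '1' ∧ PySem.Chars.isdigit (l.getD (i-2) ' ') = false then
          loop1A (l.take (i-1) ++ l.drop i) i
        else if l.getD (i-1) ' ' = '1' ∧ l.getD (i-2) ' ' = '-' then
          loop1A (l.take (i-1) ++ l.drop i) i
        else loop1A l (i+1)
      else
        if l.getD (i-1) ' ' = '1' then loop1A (l.drop i) (i+1)
        else loop1A l (i+1)
    else loop1A l (i+1)
  else l
termination_by l.length - i
decreasing_by all_goals ((try simp [List.length_append, List.length_take, List.length_drop]); (try omega))

-- second while loop: "+x-…" becomes "- …"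
def loop2A (l : List Char) (i : Nat) : List Char :=
  if h : i < l.length then
    if l.getD i ' ' = '+' then
      if h2 : i + 2 < l.length then
        if l.getD (i+2) ' ' = '-' then
          loop2A (l.take i ++ l.getD (i+2) ' ' :: ' ' :: l.drop (i+3)) (i+1)
        else loop2A l (i+1)
      else l  -- Python raises IndexError on q[i+2] here; such inputs are outside Pre_
    else loop2A l (i+1)
  else l
termination_by l.length - i
decreasing_by all_goals ((try simp [List.length_append, List.length_take, List.length_drop]); (try omega))

-- third while loop: delete "^1"
def loop3A (l : List Char) (i : Nat) : List Char :=
  if h : i < l.length then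
    if l.getD i ' ' = '^' then
      if h2 : i + 1 < l.length then
        if l.getD (i+1) ' ' = '1' then loop3A (l.take i ++ l.drop (i+2)) i
        else loop3A l (i+1)
      else l  -- Python raises IndexError on q[i+1] here; such inputs are outside Pre_
    else loop3A l (i+1)
  else l
termination_by l.length - i
decreasing_by all_goals ((try simp [List.length_append, List.length_take, List.length_drop]); (try omega))

def tidy_algebra (q : String) : String :=
  String.ofList (loop3A (loop2A (loop1A q.toList 1) 1) 1)

-- ===== PORT B =====
-- pass 1 over a buffer: acc holds the processed prefix REVERSED (acc head = Python out[-1])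
def pass1Aux : List Char → List Char → List Char
  | acc, [] => acc.reverse
  | [], c :: rest => pass1Aux [c] rest
  | a :: as, c :: rest =>
    if PySem.Chars.isalpha c = true ∧ a = '1' ∧
       (as = [] ∨ PySem.Chars.isdigit (as.headD ' ') = false) then
      pass1Aux (c :: as) rest
    else
      pass1Aux (c :: a :: as) rest
termination_by _ rest => rest.length

-- pass 2, applied to everything after the first (never-inspected) character
def f2 : List Char → List Char
  | [] => []
  | c :: rest =>
    if c = '+' ∧ 2 ≤ rest.length ∧ rest.getD 1 ' ' = '-' then
      '-' :: ' ' :: f2 (rest.drop 2)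
    else c :: f2 rest
termination_by l => l.length
decreasing_by all_goals ((try simp [List.length_drop]); (try omega))

-- pass 3, applied to everything after the first (never-inspected) character
def f3 : List Char → List Char
  | [] => []
  | c :: rest =>
    if c = '^' ∧ 1 ≤ rest.length ∧ rest.getD 0 ' ' = '1' then f3 (rest.drop 1)
    else c :: f3 rest
termination_by l => l.length
decreasing_by all_goals ((try simp [List.length_drop]); (try omega))

def pass2 : List Char → List Char
  | [] => []
  | c :: rest => c :: f2 rest

def pass3 : List Char → List Char
  | [] => []
  | c :: rest => c :: f3 rest

def tidy_algebra_alt (q : String) : String :=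
  String.ofList (pass3 (pass2 (pass1Aux [] q.toList)))

-- ===== PRECONDITION & SPEC =====
-- closed-form description of A's first pass: position j of the string is deleted by it iff
-- it holds a '1' standing directly before a letter and not directly after a digit.
def delAt (l : List Char) (j : Nat) : Bool :=
  l.getD j ' ' == '1' && PySem.Chars.isalpha (l.getD (j+1) ' ') &&
    (decide (j = 0) || !PySem.Chars.isdigit (l.getD (j-1) ' '))

-- the string with its '1'-coefficients removed: the characters at the non-deleted positions
def stripped (l : List Char) : List Char :=
  ((List.range l.length).filter (fun j => !delAt l j)).map (fun j => l.getD j ' ')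

-- tail2ok inspects the REVERSED scanned region (everything after position 0): it is false
-- exactly when the region ends in '+', or has '+' second-to-last without the completing
-- '+x-' pattern that A rewrites — the two shapes on which A's unguarded q[i+2] raises.
def tail2ok : List Char → Bool
  | [] => true
  | [x] => x != '+'
  | x :: y :: xs => x != '+' && (y != '+' || (xs.headD ' ' == '+' && x == '-'))

-- Pre_ excludes exactly the inputs on which A raises IndexError: after the '1'-coefficient
-- pass, the scanned part of the string ends in '^', ends in '+', or has '+' second-to-last
-- without a completing '+x-' replacement pattern.
def Pre_tidy_algebra (q : String) : Prop :=
  tail2ok ((stripped q.toList).drop 1).reverse = true ∧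
  ((stripped q.toList).drop 1).getLast? ≠ some '^'
instance (q : String) : Decidable (Pre_tidy_algebra q) := by unfold Pre_tidy_algebra; infer_instance

def pvWitness_tidy_algebra : String := "x^2 + 2y"

def Spec_tidy_algebra (q : String) (out : String) : Prop := out = tidy_algebra_alt q
instance (q : String) (out : String) : Decidable (Spec_tidy_algebra q out) := by unfold Spec_tidy_algebra; infer_instance

-- ===== CLAIM (what is proved, stated in full; the proofs are below) =====
def Claim_equal_tidy_algebra : Prop := ∀ (q : String), Dom_tidy_algebra q → Pre_tidy_algebra q → Spec_tidy_algebra q (tidy_algebra q)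

-- ===== LEMMAS AND PROOFS =====

theorem takeRevSucc (l : List Char) (k : Nat) (hk : k < l.length) :
    (l.take (k+1)).reverse = l[k] :: (l.take k).reverse := by
  rw [List.take_add_one]
  simp [List.getElem?_eq_getElem hk]

theorem isalpha_ne_one {c : Char} (h : PySem.Chars.isalpha c = true) : c ≠ '1' := by
  rintro rfl
  have : PySem.Chars.isalpha '1' = false := by decide
  rw [this] at h
  exact absurd h (by decide)

-- recursive formulation of `stripped` used by the proofs (prev = preceding ORIGINAL character)
def prevOk (prev : Option Char) : Bool :=
  match prev with
  | none => true
  | some p => !(PySem.Chars.isdigit p)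

def strip1 (prev : Option Char) : List Char → List Char
  | [] => []
  | c :: rest =>
    if c = '1' ∧ PySem.Chars.isalpha (rest.headD ' ') = true ∧ prevOk prev = true then
      strip1 (some c) rest
    else c :: strip1 (some c) rest

-- delAt with an explicit preceding character (for the induction)
def delAtP (p : Char) (rest : List Char) (j : Nat) : Bool :=
  rest.getD j ' ' == '1' && PySem.Chars.isalpha (rest.getD (j+1) ' ') &&
    !PySem.Chars.isdigit (if j = 0 then p else rest.getD (j-1) ' ')

theorem delAt_cons (c : Char) (rest : List Char) (j : Nat) :
    delAt (c :: rest) (j+1) = delAtP c rest j := by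
  cases j <;> simp [delAt, delAtP]

theorem delAtP_cons (p c : Char) (rest : List Char) (j : Nat) :
    delAtP p (c :: rest) (j+1) = delAtP c rest j := by
  cases j <;> simp [delAtP]

theorem filterMap_range_succ (P : Nat → Bool) (f : Nat → Char) (n : Nat) :
    ((List.range (n+1)).filter P).map f =
      (if P 0 then [f 0] else []) ++
        ((List.range n).filter (fun j => P (j+1))).map (fun j => f (j+1)) := by
  rw [List.range_succ_eq_map, List.filter_cons]
  split
  · rw [List.map_cons, List.filter_map, List.map_map]
    rfl
  · rw [List.filter_map, List.map_map]
    rfl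

theorem get0_headD (l : List Char) : l[0]?.getD ' ' = l.headD ' ' := by
  cases l <;> rfl

theorem delAtP_zero (p c : Char) (rest : List Char) :
    delAtP p (c :: rest) 0
      = (c == '1' && PySem.Chars.isalpha (rest.headD ' ') && !PySem.Chars.isdigit p) := by
  simp [delAtP, get0_headD]

theorem delAt_zero (c : Char) (rest : List Char) :
    delAt (c :: rest) 0 = (c == '1' && PySem.Chars.isalpha (rest.headD ' ')) := by
  simp [delAt, get0_headD]

theorem strippedP_eq (rest : List Char) : ∀ p : Char,
    ((List.range rest.length).filter (fun j => !delAtP p rest j)).map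
        (fun j => rest.getD j ' ') = strip1 (some p) rest := by
  induction rest with
  | nil => intro p; simp [strip1]
  | cons c rest' ih =>
    intro p
    rw [List.length_cons, filterMap_range_succ]
    simp only [delAtP_cons, List.getD_cons_succ, List.getD_cons_zero, ih c]
    rw [strip1, delAtP_zero]
    by_cases hD : c = '1' ∧ PySem.Chars.isalpha (rest'.headD ' ') = true ∧
        prevOk (some p) = true
    · obtain ⟨rfl, h2, h3⟩ := hD
      have hdig : PySem.Chars.isdigit p = false := by simpa [prevOk] using h3
      rw [if_neg (by simp [hdig]; rwa [List.headD_eq_head?_getD] at h2), if_pos ⟨rfl, h2, h3⟩]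
      simp
    · rw [if_pos (by
        cases h1 : (c == '1') <;> cases h2 : PySem.Chars.isalpha (rest'.headD ' ') <;>
          cases h3 : PySem.Chars.isdigit p <;>
            simp_all [prevOk, beq_iff_eq, List.headD_eq_head?_getD]), if_neg hD]
      simp

theorem stripped_eq (l : List Char) : stripped l = strip1 none l := by
  cases l with
  | nil => simp [stripped, strip1]
  | cons c rest =>
    rw [stripped, List.length_cons, filterMap_range_succ]
    simp only [delAt_cons, List.getD_cons_succ, List.getD_cons_zero, strippedP_eq rest c]
    rw [strip1, delAt_zero]
    by_cases hD : c = '1' ∧ PySem.Chars.isalpha (rest.headD ' ') = true ∧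
        prevOk none = true
    · obtain ⟨rfl, h2, _⟩ := hD
      rw [if_neg (by simp; rwa [List.headD_eq_head?_getD] at h2), if_pos ⟨rfl, h2, rfl⟩]
      simp
    · rw [if_pos (by
        cases h1 : (c == '1') <;> cases h2 : PySem.Chars.isalpha (rest.headD ' ') <;>
          simp_all [prevOk, beq_iff_eq, List.headD_eq_head?_getD]), if_neg hD]
      simp

-- ===== pass1Aux = strip1-- ===== pass1Aux = strip1 =====
-- "no pending pop": the next pass1Aux step will not pop the accumulator's head
def NP : List Char → List Char → Prop
  | [], _ => True
  | a :: as, l => ¬(PySem.Chars.isalpha (l.headD ' ') = true ∧ a = '1' ∧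
      (as = [] ∨ PySem.Chars.isdigit (as.headD ' ') = false))

theorem strip_eq (n : Nat) : ∀ (l acc : List Char), l.length ≤ n → NP acc l →
    pass1Aux acc l = acc.reverse ++ strip1 acc.head? l := by
  induction n with
  | zero =>
    intro l acc hn _
    have : l = [] := List.eq_nil_of_length_eq_zero (by omega)
    subst this
    cases acc <;> simp [pass1Aux, strip1]
  | succ n ih =>
    intro l acc hn hnp
    cases l with
    | nil => cases acc <;> simp [pass1Aux, strip1]
    | cons c rest =>
      cases acc with
      | nil =>
        rw [show pass1Aux [] (c :: rest) = pass1Aux [c] rest from by rw [pass1Aux]]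
        by_cases hD : c = '1' ∧ PySem.Chars.isalpha (rest.headD ' ') = true
        · obtain ⟨rfl, hal⟩ := hD
          have hne : rest ≠ [] := by
            intro h; rw [h] at hal; exact absurd hal (by decide)
          obtain ⟨d, rest', rfl⟩ : ∃ d r', rest = d :: r' := by
            cases rest with
            | nil => exact absurd rfl hne
            | cons d r' => exact ⟨d, r', rfl⟩
          simp only [List.headD_cons] at hal
          rw [show pass1Aux ['1'] (d :: rest') = pass1Aux [d] rest' from by
            rw [pass1Aux, if_pos ⟨hal, rfl, Or.inl rfl⟩]]
          rw [ih rest' [d] (by simp at hn ⊢; omega)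
            (by intro ⟨h1, h2, _⟩; exact isalpha_ne_one hal h2)]
          simp only [List.head?_cons, List.head?_nil]
          rw [show strip1 none ('1' :: d :: rest') = strip1 (some '1') (d :: rest') from by
            rw [strip1, if_pos ⟨rfl, by simpa using hal, rfl⟩]]
          rw [show strip1 (some '1') (d :: rest') = d :: strip1 (some d) rest' from by
            rw [strip1, if_neg (by rintro ⟨h1, _, _⟩; exact isalpha_ne_one hal h1)]]
          simp
        · rw [ih rest [c] (by simp at hn ⊢; omega)
            (by rintro ⟨h1, rfl, _⟩; exact hD ⟨rfl, h1⟩)]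
          simp only [List.head?_cons, List.head?_nil]
          rw [show strip1 none (c :: rest) = c :: strip1 (some c) rest from by
            rw [strip1, if_neg (by rintro ⟨rfl, h2, _⟩; exact hD ⟨rfl, h2⟩)]]
          simp
      | cons a as =>
        have hnp' : ¬(PySem.Chars.isalpha c = true ∧ a = '1' ∧
            (as = [] ∨ PySem.Chars.isdigit (as.headD ' ') = false)) := by
          simpa [NP] using hnp
        rw [show pass1Aux (a :: as) (c :: rest) = pass1Aux (c :: a :: as) rest from by
          rw [pass1Aux, if_neg hnp']]
        by_cases hD : c = '1' ∧ PySem.Chars.isalpha (rest.headD ' ') = true ∧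
            PySem.Chars.isdigit a = false
        · obtain ⟨rfl, hal, hd⟩ := hD
          obtain ⟨d, rest', rfl⟩ : ∃ d r', rest = d :: r' := by
            cases rest with
            | nil => exact absurd hal (by decide)
            | cons d r' => exact ⟨d, r', rfl⟩
          simp only [List.headD_cons] at hal
          rw [show pass1Aux ('1' :: a :: as) (d :: rest') = pass1Aux (d :: a :: as) rest' from by
            rw [pass1Aux, if_pos ⟨hal, rfl, Or.inr (by simpa using hd)⟩]]
          rw [ih rest' (d :: a :: as) (by simp at hn ⊢; omega)
            (by rintro ⟨h1, h2, _⟩; exact isalpha_ne_one hal h2)]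
          simp only [List.head?_cons]
          rw [show strip1 (some a) ('1' :: d :: rest') = strip1 (some '1') (d :: rest') from by
            rw [strip1, if_pos ⟨rfl, by simpa using hal, by simp [prevOk, hd]⟩]]
          rw [show strip1 (some '1') (d :: rest') = d :: strip1 (some d) rest' from by
            rw [strip1, if_neg (by rintro ⟨h1, _, _⟩; exact isalpha_ne_one hal h1)]]
          simp
        · rw [ih rest (c :: a :: as) (by simp at hn ⊢; omega)
            (by rintro ⟨h1, rfl, h3⟩
                rcases h3 with h3 | h3
                · exact absurd h3 (by simp)
                · exact hD ⟨rfl, h1, by simpa using h3⟩)]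
          simp only [List.head?_cons]
          rw [show strip1 (some a) (c :: rest) = c :: strip1 (some c) rest from by
            rw [strip1, if_neg (by
              rintro ⟨rfl, h2, h3⟩
              exact hD ⟨rfl, h2, by simpa [prevOk] using h3⟩)]]
          simp

theorem strip_main (l : List Char) : pass1Aux [] l = strip1 none l := by
  simpa using strip_eq l.length l [] (le_refl _) trivial

-- ===== no-raise scan predicates (proof-side invariants) =====
def nr2 : List Char → Bool
  | [] => true
  | c :: rest =>
    if c = '+' then
      decide (2 ≤ rest.length) && (if rest.getD 1 ' ' = '-' then nr2 (rest.drop 2) else nr2 rest)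
    else nr2 rest
termination_by l => l.length
decreasing_by all_goals ((try simp [List.length_drop]); (try omega))

def nr3 : List Char → Bool
  | [] => true
  | c :: rest =>
    if c = '^' then
      decide (1 ≤ rest.length) && (if rest.getD 0 ' ' = '1' then nr3 (rest.drop 1) else nr3 rest)
    else nr3 rest
termination_by l => l.length
decreasing_by all_goals ((try simp [List.length_drop]); (try omega))

theorem f2_nil : f2 [] = [] := by rw [f2]
theorem nr2_nil : nr2 [] = true := by rw [nr2]
theorem nr3_nil : nr3 [] = true := by rw [nr3]

theorem tail2ok_append {l : List Char} (c : Char) (h : 3 ≤ l.length) :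
    tail2ok (l ++ [c]) = tail2ok l := by
  match l, h with
  | x :: y :: z :: tl, _ => simp [tail2ok]

theorem tail2ok_append_list (l t : List Char) (h : 3 ≤ l.length) :
    tail2ok (l ++ t) = tail2ok l := by
  induction t using List.reverseRecOn with
  | nil => simp
  | append_singleton t c ih =>
    rw [← List.append_assoc, tail2ok_append c (by simp; omega), ih]

theorem t2_nr2 (n : Nat) : ∀ r : List Char, r.length ≤ n →
    tail2ok r.reverse = true → nr2 r = true := by
  induction n with
  | zero =>
    intro r hn _
    have : r = [] := List.eq_nil_of_length_eq_zero (by omega)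
    subst this; exact nr2_nil
  | succ n ih =>
    intro r hn ht
    cases r with
    | nil => exact nr2_nil
    | cons c rest =>
      rw [List.reverse_cons] at ht
      by_cases hc : c = '+'
      · subst hc
        obtain ⟨x, y, tl, rfl⟩ : ∃ x y tl, rest = x :: y :: tl := by
          match rest, ht with
          | [], ht => exact absurd ht (by decide)
          | [x], ht => exact absurd ht (by simp [tail2ok] at ht)
          | x :: y :: tl, _ => exact ⟨x, y, tl, rfl⟩
        rw [nr2, if_pos rfl]
        simp only [List.length_cons, Nat.le_add_left, decide_true, Bool.true_and,
          List.getD_cons_succ, List.getD_cons_zero]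
        by_cases hm : y = '-'
        · subst hm
          rw [if_pos rfl]
          simp only [List.drop_succ_cons, List.drop_zero]
          apply ih tl (by simp at hn ⊢; omega)
          match tl with
          | [] => rfl
          | [u] =>
            simp only [List.reverse_cons, List.reverse_nil, List.nil_append,
              List.cons_append] at ht ⊢
            simp [tail2ok] at ht ⊢
            exact ht
          | [u, v] =>
            simp only [List.reverse_cons, List.reverse_nil, List.nil_append,
              List.cons_append] at ht ⊢
            simp [tail2ok] at ht ⊢
            exact ht
          | u :: v :: w :: tl' =>
            have hrw : (x :: '-' :: u :: v :: w :: tl').reverse ++ ['+']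
                = (u :: v :: w :: tl').reverse ++ ['-', x, '+'] := by simp
            rw [hrw, tail2ok_append_list _ _ (by simp)] at ht
            exact ht
        · rw [if_neg hm]
          apply ih (x :: y :: tl) (by simp at hn ⊢; omega)
          match tl with
          | [] =>
            simp only [List.reverse_cons, List.reverse_nil, List.nil_append] at ht ⊢
            simp [tail2ok] at ht ⊢
            exact ⟨ht.1, ht.2.resolve_right hm⟩
          | u :: tl' =>
            rw [tail2ok_append (l := (x :: y :: u :: tl').reverse) '+' (by simp)] at ht
            exact ht
      · rw [nr2, if_neg hc]
        apply ih rest (by simp at hn ⊢; omega)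
        match rest with
        | [] => rfl
        | [x] =>
          simp only [List.reverse_cons, List.reverse_nil, List.nil_append] at ht ⊢
          simp [tail2ok] at ht ⊢
          exact ht.1
        | [x, y] =>
          simp only [List.reverse_cons, List.reverse_nil, List.nil_append,
            List.cons_append] at ht ⊢
          simp [tail2ok] at ht ⊢
          exact ⟨ht.1, ht.2.resolve_right (fun h => hc h.1)⟩
        | x :: y :: z :: tl =>
          rw [tail2ok_append (l := (x :: y :: z :: tl).reverse) c (by simp)] at ht
          exact ht

theorem getLast?_cons_ne_nil {c : Char} {l : List Char} (h : l ≠ []) :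
    (c :: l).getLast? = l.getLast? := by
  cases l with
  | nil => exact absurd rfl h
  | cons d t => exact List.getLast?_cons_cons ..

theorem getLast?_drop {l : List Char} {k : Nat} (h : l.drop k ≠ []) :
    (l.drop k).getLast? = l.getLast? := by
  induction l generalizing k with
  | nil => simp at h
  | cons c t ih =>
    cases k with
    | zero => rfl
    | succ k =>
      simp only [List.drop_succ_cons] at h ⊢
      rw [ih h, getLast?_cons_ne_nil (by intro ht; rw [ht] at h; simp at h)]

theorem nr3_true (n : Nat) : ∀ r : List Char, r.length ≤ n →
    r.getLast? ≠ some '^' → nr3 r = true := by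
  induction n with
  | zero =>
    intro r hn _
    have : r = [] := List.eq_nil_of_length_eq_zero (by omega)
    subst this; exact nr3_nil
  | succ n ih =>
    intro r hn hl
    cases r with
    | nil => exact nr3_nil
    | cons c rest =>
      by_cases hc : c = '^'
      · subst hc
        cases rest with
        | nil => exact absurd (show (['^'] : List Char).getLast? = some '^' from rfl) hl
        | cons d rest' =>
          rw [nr3, if_pos rfl]
          simp only [List.length_cons, Nat.le_add_left, decide_true, Bool.true_and,
            List.getD_cons_zero]
          have hlast : (d :: rest').getLast? ≠ some '^' := by
            rwa [getLast?_cons_ne_nil (by simp)] at hl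
          by_cases hd : d = '1'
          · rw [if_pos hd]
            simp only [List.drop_succ_cons, List.drop_zero]
            apply ih rest' (by simp at hn ⊢; omega)
            cases rest' with
            | nil => simp
            | cons e t =>
              rwa [getLast?_cons_ne_nil (by simp)] at hlast
          · rw [if_neg hd]
            exact ih _ (by simp at hn ⊢; omega) hlast
      · rw [nr3, if_neg hc]
        cases rest with
        | nil => exact nr3_nil
        | cons d rest' =>
          apply ih _ (by simp at hn ⊢; omega)
          rwa [getLast?_cons_ne_nil (by simp)] at hl

theorem f2_ne_nil {s : List Char} (h : s ≠ []) : f2 s ≠ [] := by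
  cases s with
  | nil => exact absurd rfl h
  | cons c rest =>
    rw [f2]
    split <;> simp

theorem f2_last (n : Nat) : ∀ r : List Char, r.length ≤ n →
    (f2 r).getLast? = r.getLast? ∨ (f2 r).getLast? = some ' ' := by
  induction n with
  | zero =>
    intro r hn
    have : r = [] := List.eq_nil_of_length_eq_zero (by omega)
    subst this; left; rw [f2_nil]
  | succ n ih =>
    intro r hn
    cases r with
    | nil => left; rw [f2_nil]
    | cons c rest =>
      rw [f2]
      by_cases hcond : c = '+' ∧ 2 ≤ rest.length ∧ rest.getD 1 ' ' = '-'
      · rw [if_pos hcond]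
        by_cases hd : rest.drop 2 = []
        · right
          rw [hd, f2_nil]
          rfl
        · have hf : f2 (rest.drop 2) ≠ [] := f2_ne_nil hd
          rw [getLast?_cons_ne_nil (by simp [hf]), getLast?_cons_ne_nil hf]
          rcases ih (rest.drop 2) (by simp at hn ⊢; omega) with h | h
          · left
            rw [h, getLast?_drop hd, getLast?_cons_ne_nil (by rintro rfl; simp at hd)]
          · right; exact h
      · rw [if_neg hcond]
        cases rest with
        | nil => left; rw [f2_nil]
        | cons d rest' =>
          have hf : f2 (d :: rest') ≠ [] := f2_ne_nil (by simp)
          rw [getLast?_cons_ne_nil hf, getLast?_cons_ne_nil (l := d :: rest') (by simp)]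
          exact ih (d :: rest') (by simp at hn ⊢; omega)

-- ===== loop 1 = pass 1 =====

theorem loop1_eq (n : Nat) : ∀ (l : List Char) (i : Nat), l.length - i ≤ n → 1 ≤ i →
    loop1A l i = pass1Aux ((l.take i).reverse) (l.drop i) := by
  induction n with
  | zero =>
    intro l i hn hi
    have hle : l.length ≤ i := by omega
    rw [loop1A, dif_neg (by omega)]
    rw [List.drop_eq_nil_of_le hle, List.take_of_length_le hle]
    rw [pass1Aux]
    simp
  | succ n ih =>
    intro l i hn hi
    by_cases h : i < l.length
    · have hdrop : l.drop i = l[i] :: l.drop (i+1) := List.drop_eq_getElem_cons h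
      have htake : (l.take (i+1)).reverse = l[i] :: (l.take i).reverse := takeRevSucc l i h
      have htake1 : (l.take i).reverse = l[i-1] :: (l.take (i-1)).reverse := by
        have h' := takeRevSucc l (i-1) (by omega)
        rwa [Nat.sub_add_cancel hi] at h'
      have hgd : l.getD i ' ' = l[i] := List.getD_eq_getElem l ' ' h
      have hgd1 : l.getD (i-1) ' ' = l[i-1] := List.getD_eq_getElem l ' ' (by omega)
      by_cases ha : PySem.Chars.isalpha (l.getD i ' ') = true
      · by_cases h2 : 1 < i
        · have htake2 : (l.take (i-1)).reverse = l[i-2] :: (l.take (i-2)).reverse := by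
            have h' := takeRevSucc l (i-2) (by omega)
            rwa [show i-2+1 = i-1 from by omega] at h'
          have hgd2 : l.getD (i-2) ' ' = l[i-2] := List.getD_eq_getElem l ' ' (by omega)
          have htk : (l.take (i-1)).length = i - 1 := by
            simp [List.length_take]; omega
          by_cases hc1 : l.getD (i-1) ' ' = '1' ∧ PySem.Chars.isdigit (l.getD (i-2) ' ') = false
          · -- delete branch
            rw [loop1A, dif_pos h, if_pos ha, if_pos h2, if_pos hc1]
            obtain ⟨hc1a, hc1b⟩ := hc1
            have hlen' : (l.take (i-1) ++ l.drop i).length - i ≤ n := by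
              simp [List.length_take, List.length_drop]
              omega
            rw [ih _ i hlen' (by omega)]
            have e1 : (l.take (i-1) ++ l.drop i).take i = l.take (i-1) ++ [l[i]] := by
              rw [List.take_append, htk, List.take_of_length_le (by rw [htk]; omega),
                  show i - (i-1) = 1 from by omega, hdrop]
              rfl
            have e2 : (l.take (i-1) ++ l.drop i).drop i = l.drop (i+1) := by
              rw [List.drop_append, htk, List.drop_eq_nil_of_le (by rw [htk]; omega),
                  show i - (i-1) = 1 from by omega, hdrop]
              rfl
            rw [e1, e2]
            -- pass side
            rw [hdrop, htake1, htake2]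
            rw [pass1Aux, if_pos (by
              refine ⟨by rwa [hgd] at ha, by rwa [hgd1] at hc1a, Or.inr ?_⟩
              simpa using (by rwa [hgd2] at hc1b))]
            rw [show (l.take (i-1) ++ [l[i]]).reverse = l[i] :: (l.take (i-1)).reverse from by simp,
                htake2]
          · -- second (dead) branch: its guard implies the first
            have hc2 : ¬ (l.getD (i-1) ' ' = '1' ∧ l.getD (i-2) ' ' = '-') := by
              rintro ⟨e1', e2'⟩
              exact hc1 ⟨e1', by rw [e2']; decide⟩
            rw [loop1A, dif_pos h, if_pos ha, if_pos h2, if_neg hc1, if_neg hc2]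
            rw [ih l (i+1) (by omega) (by omega)]
            rw [hdrop, htake, htake1, htake2]
            rw [pass1Aux, if_neg (by
              rintro ⟨b1, b2, b3⟩
              apply hc1
              refine ⟨by rwa [hgd1], ?_⟩
              rcases b3 with b3 | b3
              · exact absurd b3 (by simp)
              · rw [hgd2]
                simpa using b3)]
        · -- i = 1
          have hi1 : i = 1 := by omega
          subst hi1
          have hgd0 : l.getD 0 ' ' = l[0] := List.getD_eq_getElem l ' ' (by omega)
          have htk0 : (l.take 1).reverse = [l[0]] := by
            simpa using takeRevSucc l 0 (by omega)
          by_cases hc : l.getD 0 ' ' = '1'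
          · rw [loop1A, dif_pos h, if_pos ha, if_neg (by omega), if_pos hc]
            rw [ih (l.drop 1) 2 (by simp [List.length_drop]; omega) (by omega)]
            rw [hdrop, htk0]
            rw [pass1Aux, if_pos ⟨by rwa [hgd] at ha, by rw [← hgd0, hc], Or.inl rfl⟩]
            simp only [Nat.reduceAdd]
            by_cases h3 : 2 < l.length
            · have hd2 : l.drop 2 = l[2] :: l.drop 3 := by
                simpa using List.drop_eq_getElem_cons h3
              rw [hd2]
              rw [show List.take 2 (l[1] :: l[2] :: l.drop 3) = [l[1], l[2]] from rfl]
              rw [show List.drop 2 (l[1] :: l[2] :: l.drop 3) = l.drop 3 from rfl]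
              rw [show ([l[1], l[2]] : List Char).reverse = [l[2], l[1]] from rfl]
              rw [pass1Aux, if_neg (by
                rintro ⟨b1, b2, b3⟩
                exact isalpha_ne_one (by rwa [hgd] at ha) b2)]
            · have hd2 : l.drop 2 = [] := List.drop_eq_nil_of_le (by omega)
              rw [hd2]
              rfl
          · rw [loop1A, dif_pos h, if_pos ha, if_neg (by omega), if_neg hc]
            rw [ih l 2 (by omega) (by omega)]
            rw [hdrop, htk0]
            rw [pass1Aux, if_neg (by
              rintro ⟨b1, b2, b3⟩
              exact hc (by rw [hgd0, b2]))]
            have e1 : (l.take 2).reverse = [l[1], l[0]] := by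
              rw [show (2:Nat) = 1 + 1 from rfl, takeRevSucc l 1 h, htk0]
            rw [e1]
      · -- not alpha
        rw [loop1A, dif_pos h, if_neg ha]
        rw [ih l (i+1) (by omega) (by omega)]
        rw [hdrop, htake, htake1]
        rw [pass1Aux, if_neg (by
          rintro ⟨b1, b2, b3⟩
          exact ha (by rwa [hgd]))]
    · rw [loop1A, dif_neg h]
      have hle : l.length ≤ i := by omega
      rw [List.drop_eq_nil_of_le hle, List.take_of_length_le hle]
      rw [pass1Aux]
      simp

-- ===== loop 2 = pass 2 (under the exact no-raise scan invariant nr2) =====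

theorem loop2_eq (n : Nat) : ∀ (l : List Char) (i : Nat), l.length - i ≤ n → 1 ≤ i →
    nr2 (l.drop i) = true → loop2A l i = l.take i ++ f2 (l.drop i) := by
  induction n with
  | zero =>
    intro l i hn hi hp
    have hle : l.length ≤ i := by omega
    rw [loop2A, dif_neg (by omega)]
    rw [List.drop_eq_nil_of_le hle, List.take_of_length_le hle]
    rw [f2]
    simp
  | succ n ih =>
    intro l i hn hi hp
    by_cases h : i < l.length
    · have hdrop : l.drop i = l[i] :: l.drop (i+1) := List.drop_eq_getElem_cons h
      have hgd : l.getD i ' ' = l[i] := List.getD_eq_getElem l ' ' h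
      have htake : l.take (i+1) = l.take i ++ [l[i]] := by
        rw [List.take_add_one]
        simp [List.getElem?_eq_getElem h]
      by_cases hc : l.getD i ' ' = '+'
      · have hp' : nr2 (l[i] :: l.drop (i+1)) = true := by rwa [hdrop] at hp
        rw [← hgd, hc] at hp'
        rw [nr2, if_pos rfl, Bool.and_eq_true, decide_eq_true_eq] at hp'
        obtain ⟨hlb, hrest⟩ := hp'
        have hlen : i + 2 < l.length := by
          simp [List.length_drop] at hlb
          omega
        have hd1 : l.drop (i+1) = l[i+1] :: l.drop (i+2) := List.drop_eq_getElem_cons (by omega)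
        have hd2 : l.drop (i+2) = l[i+2] :: l.drop (i+3) := by
          have := List.drop_eq_getElem_cons hlen
          simpa using this
        have hgd2 : l.getD (i+2) ' ' = l[i+2] := List.getD_eq_getElem l ' ' hlen
        have hgetd1 : (l.drop (i+1)).getD 1 ' ' = l[i+2] := by
          rw [hd1, hd2]
          rfl
        have htk : (l.take i).length = i := by simp [List.length_take]; omega
        by_cases hm : l.getD (i+2) ' ' = '-'
        · rw [loop2A, dif_pos h, if_pos hc, dif_pos hlen, if_pos hm]
          have hrest' : nr2 ((l.drop (i+1)).drop 2) = true := by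
            rw [if_pos (by rw [hgetd1, ← hgd2]; exact hm)] at hrest
            exact hrest
          have hdd : (l.drop (i+1)).drop 2 = l.drop (i+3) := by
            rw [hd1, hd2]
            rfl
          rw [hdd] at hrest'
          have e1 : (l.take i ++ l.getD (i+2) ' ' :: ' ' :: l.drop (i+3)).take (i+1)
              = l.take i ++ ['-'] := by
            rw [List.take_append, htk, List.take_of_length_le (by rw [htk]; omega),
                show i + 1 - i = 1 from by omega, hm]
            rfl
          have e2 : (l.take i ++ l.getD (i+2) ' ' :: ' ' :: l.drop (i+3)).drop (i+1)
              = ' ' :: l.drop (i+3) := by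
            rw [List.drop_append, htk, List.drop_eq_nil_of_le (by rw [htk]; omega),
                show i + 1 - i = 1 from by omega]
            rfl
          have hp2 : nr2 ((l.take i ++ l.getD (i+2) ' ' :: ' ' :: l.drop (i+3)).drop (i+1)) = true := by
            rw [e2, nr2, if_neg (by decide)]
            exact hrest'
          rw [ih _ (i+1) (by simp [List.length_append, List.length_take, List.length_drop]; omega)
            (by omega) hp2]
          rw [e1, e2]
          have ef2a : f2 (' ' :: l.drop (i+3)) = ' ' :: f2 (l.drop (i+3)) := by
            rw [f2, if_neg (by rintro ⟨b1, _⟩; exact absurd b1 (by decide))]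
          have ef2b : f2 (l[i] :: l[i+1] :: l[i+2] :: l.drop (i+3))
              = '-' :: ' ' :: f2 (l.drop (i+3)) := by
            rw [f2, if_pos ⟨by rw [← hgd]; exact hc, by simp only [List.length_cons]; omega,
              by rw [List.getD_cons_succ, List.getD_cons_zero, ← hgd2]; exact hm⟩]
            rfl
          rw [hdrop, hd1, hd2, ef2a, ef2b]
          simp only [List.append_assoc, List.singleton_append, List.cons_append, List.nil_append]
        · rw [loop2A, dif_pos h, if_pos hc, dif_pos hlen, if_neg hm]
          have hrest' : nr2 (l.drop (i+1)) = true := by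
            rw [if_neg (by rw [hgetd1, ← hgd2]; exact hm)] at hrest
            exact hrest
          rw [ih l (i+1) (by omega) (by omega) hrest']
          have ef2 : f2 (l[i] :: l.drop (i+1)) = l[i] :: f2 (l.drop (i+1)) := by
            rw [f2, if_neg (by
              rintro ⟨b1, b2, b3⟩
              rw [hgetd1] at b3
              exact hm (by rw [hgd2, b3]))]
          rw [htake, hdrop, ef2]
          simp only [List.append_assoc, List.singleton_append]
      · rw [loop2A, dif_pos h, if_neg hc]
        have hp1 : nr2 (l.drop (i+1)) = true := by
          rw [hdrop, nr2, if_neg (by rw [← hgd]; exact hc)] at hp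
          exact hp
        rw [ih l (i+1) (by omega) (by omega) hp1]
        have ef2 : f2 (l[i] :: l.drop (i+1)) = l[i] :: f2 (l.drop (i+1)) := by
          rw [f2, if_neg (by rintro ⟨b1, _⟩; exact hc (by rw [hgd, b1]))]
        rw [htake, hdrop, ef2]
        simp only [List.append_assoc, List.singleton_append]
    · rw [loop2A, dif_neg h]
      have hle : l.length ≤ i := by omega
      rw [List.drop_eq_nil_of_le hle, List.take_of_length_le hle]
      rw [f2]
      simp

-- ===== loop 3 = pass 3 (under the exact no-raise scan invariant nr3) =====

theorem loop3_eq (n : Nat) : ∀ (l : List Char) (i : Nat), l.length - i ≤ n → 1 ≤ i →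
    nr3 (l.drop i) = true → loop3A l i = l.take i ++ f3 (l.drop i) := by
  induction n with
  | zero =>
    intro l i hn hi hp
    have hle : l.length ≤ i := by omega
    rw [loop3A, dif_neg (by omega)]
    rw [List.drop_eq_nil_of_le hle, List.take_of_length_le hle]
    rw [f3]
    simp
  | succ n ih =>
    intro l i hn hi hp
    by_cases h : i < l.length
    · have hdrop : l.drop i = l[i] :: l.drop (i+1) := List.drop_eq_getElem_cons h
      have hgd : l.getD i ' ' = l[i] := List.getD_eq_getElem l ' ' h
      have htake : l.take (i+1) = l.take i ++ [l[i]] := by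
        rw [List.take_add_one]
        simp [List.getElem?_eq_getElem h]
      by_cases hc : l.getD i ' ' = '^'
      · have hp' : nr3 (l[i] :: l.drop (i+1)) = true := by rwa [hdrop] at hp
        rw [← hgd, hc] at hp'
        rw [nr3, if_pos rfl, Bool.and_eq_true, decide_eq_true_eq] at hp'
        obtain ⟨hlb, hrest⟩ := hp'
        have hlen : i + 1 < l.length := by
          simp [List.length_drop] at hlb
          omega
        have hd1 : l.drop (i+1) = l[i+1] :: l.drop (i+2) := List.drop_eq_getElem_cons hlen
        have hgd1 : l.getD (i+1) ' ' = l[i+1] := List.getD_eq_getElem l ' ' hlen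
        have hgetd0 : (l.drop (i+1)).getD 0 ' ' = l[i+1] := by
          rw [hd1]
          rfl
        have htk : (l.take i).length = i := by simp [List.length_take]; omega
        by_cases hm : l.getD (i+1) ' ' = '1'
        · rw [loop3A, dif_pos h, if_pos hc, dif_pos hlen, if_pos hm]
          have hrest' : nr3 ((l.drop (i+1)).drop 1) = true := by
            rw [if_pos (by rw [hgetd0, ← hgd1]; exact hm)] at hrest
            exact hrest
          have hdd : (l.drop (i+1)).drop 1 = l.drop (i+2) := by
            rw [hd1]
            rfl
          rw [hdd] at hrest'
          have e1 : (l.take i ++ l.drop (i+2)).take i = l.take i := by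
            rw [List.take_append, htk, Nat.sub_self,
                List.take_of_length_le (by rw [htk])]
            simp
          have e2 : (l.take i ++ l.drop (i+2)).drop i = l.drop (i+2) := by
            rw [List.drop_append, htk, Nat.sub_self,
                List.drop_eq_nil_of_le (by rw [htk])]
            rfl
          rw [ih _ i (by simp [List.length_append, List.length_take, List.length_drop]; omega)
            hi (by rw [e2]; exact hrest')]
          rw [e1, e2]
          have ef3 : f3 (l[i] :: l[i+1] :: l.drop (i+2)) = f3 (l.drop (i+2)) := by
            rw [f3, if_pos ⟨by rw [← hgd]; exact hc, by simp only [List.length_cons]; omega,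
              by rw [List.getD_cons_zero, ← hgd1]; exact hm⟩]
            rfl
          rw [hdrop, hd1, ef3]
        · rw [loop3A, dif_pos h, if_pos hc, dif_pos hlen, if_neg hm]
          have hrest' : nr3 (l.drop (i+1)) = true := by
            rw [if_neg (by rw [hgetd0, ← hgd1]; exact hm)] at hrest
            exact hrest
          rw [ih l (i+1) (by omega) (by omega) hrest']
          have ef3 : f3 (l[i] :: l.drop (i+1)) = l[i] :: f3 (l.drop (i+1)) := by
            rw [f3, if_neg (by
              rintro ⟨b1, b2, b3⟩
              rw [hgetd0] at b3
              exact hm (by rw [hgd1, b3]))]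
          rw [htake, hdrop, ef3]
          simp only [List.append_assoc, List.singleton_append]
      · rw [loop3A, dif_pos h, if_neg hc]
        have hp1 : nr3 (l.drop (i+1)) = true := by
          rw [hdrop, nr3, if_neg (by rw [← hgd]; exact hc)] at hp
          exact hp
        rw [ih l (i+1) (by omega) (by omega) hp1]
        have ef3 : f3 (l[i] :: l.drop (i+1)) = l[i] :: f3 (l.drop (i+1)) := by
          rw [f3, if_neg (by rintro ⟨b1, _⟩; exact hc (by rw [hgd, b1]))]
        rw [htake, hdrop, ef3]
        simp only [List.append_assoc, List.singleton_append]
    · rw [loop3A, dif_neg h]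
      have hle : l.length ≤ i := by omega
      rw [List.drop_eq_nil_of_le hle, List.take_of_length_le hle]
      rw [f3]
      simp

-- start-up: position 0 is never inspected by any of A's loops
theorem pass1_start (l : List Char) :
    pass1Aux ((l.take 1).reverse) (l.drop 1) = pass1Aux [] l := by
  cases l with
  | nil => rfl
  | cons c r =>
    rw [show pass1Aux [] (c :: r) = pass1Aux [c] r from by rw [pass1Aux]]
    simp

theorem main_list (l : List Char)
    (h2 : tail2ok ((strip1 none l).drop 1).reverse = true)
    (h3 : ((strip1 none l).drop 1).getLast? ≠ some '^') :
    loop3A (loop2A (loop1A l 1) 1) 1 = pass3 (pass2 (pass1Aux [] l)) := by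
  have h1 : loop1A l 1 = pass1Aux [] l := by
    rw [loop1_eq l.length l 1 (by omega) (by omega), pass1_start]
  have hs : pass1Aux [] l = strip1 none l := strip_main l
  have hnr2 : nr2 ((strip1 none l).drop 1) = true :=
    t2_nr2 _ _ (le_refl _) h2
  have hpass2 : loop2A (strip1 none l) 1 = pass2 (strip1 none l) := by
    rw [loop2_eq (strip1 none l).length _ 1 (by omega) (by omega) hnr2]
    cases hq : strip1 none l with
    | nil => simp [f2, pass2]
    | cons c r => simp [pass2]
  have hnr3 : nr3 ((pass2 (strip1 none l)).drop 1) = true := by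
    cases hq : strip1 none l with
    | nil => rw [pass2]; simpa using nr3_nil
    | cons c r =>
      rw [show pass2 (c :: r) = c :: f2 r from rfl]
      simp only [List.drop_one, List.tail_cons]
      apply nr3_true (f2 r).length _ (le_refl _)
      rcases f2_last r.length r (le_refl _) with h | h
      · rw [h]
        rw [hq] at h3
        simpa using h3
      · rw [h]
        decide
  have hpass3 : loop3A (pass2 (strip1 none l)) 1 = pass3 (pass2 (strip1 none l)) := by
    rw [loop3_eq (pass2 (strip1 none l)).length _ 1 (by omega) (by omega) hnr3]
    cases hq : pass2 (strip1 none l) with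
    | nil => simp [f3, pass3]
    | cons c r => simp [pass3]
  rw [h1, hs, hpass2, hpass3]

-- ===== VERDICT (by name: the statement is the Claim_ definition above) =====
theorem tidy_algebra_spec : Claim_equal_tidy_algebra := by
  intro q _hdom hpre
  unfold Spec_tidy_algebra tidy_algebra tidy_algebra_alt
  obtain ⟨h2, h3⟩ := hpre
  rw [stripped_eq] at h2 h3
  exact congrArg String.ofList (main_list q.toList h2 h3)
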